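-- pv_equiv track=rewrite | github.com/lingendj/AdventOfCode2024 | src/day06.py | get_positions
-- ===== SOURCE A (Python) =====
-- from typing import List, Tuple, Set
--
-- def guard_direction_from_character(character: str) -> Tuple[int]:
--     if character == '^':
--         return 0
--     if character == '>':
--         return 1
--     if character == 'v':
--         return 2
--     if character == '<':
--         return 3
--     return None
--
-- def get_positions(grid: List[str]):
--     obstacles = []
--     guard_direction_index = None
--     guard_position = None
--     for i_row, row in enumerate(grid):
--         for i_col, char in enumerate(row):
--             if char == '#':
--                 obstacles += [(i_row, i_col)]
--             elif guard_direction_from_character(char) is not None: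
--                 guard_direction_index = guard_direction_from_character(char)
--                 guard_position = (i_row, i_col)
--     return obstacles, guard_position, guard_direction_index
-- ===== SOURCE B (Python) =====
-- DIRS = {'^': 0, '>': 1, 'v': 2, '<': 3}
--
-- def get_positions(grid):
--     obstacles = [(r, c) for r, row in enumerate(grid)
--                  for c, ch in enumerate(row) if ch == '#']
--     # the guard kept by A is the LAST direction char in row-major order:
--     # scan back-to-front and return at the first match
--     for r in range(len(grid) - 1, -1, -1):
--         row = grid[r]
--         for c in range(len(row) - 1, -1, -1):
--             d = DIRS.get(row[c])
--             if d is not None: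
--                 return obstacles, (r, c), d
--     return obstacles, None, None
-- ===== Notes on version B (the rewrite author's own statement) =====
-- stated objective: alternative
-- what changed: B collects obstacles in one flat comprehension and finds the guard by a separate reverse scan with early return (first match from the end = A's last match), instead of A's single forward fold threading all three accumulators.
import Mathlib
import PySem

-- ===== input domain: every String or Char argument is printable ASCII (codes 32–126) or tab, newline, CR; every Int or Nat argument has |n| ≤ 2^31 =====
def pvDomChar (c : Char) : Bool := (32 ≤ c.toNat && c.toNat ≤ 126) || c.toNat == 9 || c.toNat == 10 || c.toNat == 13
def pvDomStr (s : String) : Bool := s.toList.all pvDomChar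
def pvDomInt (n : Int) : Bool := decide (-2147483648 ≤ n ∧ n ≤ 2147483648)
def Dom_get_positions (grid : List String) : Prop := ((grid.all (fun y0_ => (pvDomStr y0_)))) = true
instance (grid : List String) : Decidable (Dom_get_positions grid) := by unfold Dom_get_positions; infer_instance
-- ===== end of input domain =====

-- B differs from A only in decomposition: one flat comprehension for obstacles plus a
-- reverse scan with early return for the guard; same values everywhere.

-- ===== PORT A =====
def guard_direction_from_character (character : Char) : Option Int :=
  if character = '^' then some 0
  else if character = '>' then some 1
  else if character = 'v' then some 2
  else if character = '<' then some 3
  else none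

-- A's inner-loop body, step for step
def pvStepA (r : Int) (st : (List (Int × Int)) × (Option (Int × Int)) × Option Int)
    (cp : Int × Char) : (List (Int × Int)) × (Option (Int × Int)) × Option Int :=
  if cp.2 = '#' then (st.1 ++ [(r, cp.1)], st.2)
  else if (guard_direction_from_character cp.2).isSome then
    (st.1, some (r, cp.1), guard_direction_from_character cp.2)
  else st

def get_positions (grid : List String) : (List (Int × Int)) × (Option (Int × Int)) × Option Int :=
  (PySem.List.enumerate grid).foldl
    (fun st rp => (PySem.List.enumerate rp.2.toList).foldl (pvStepA rp.1) st)
    ([], none, none)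

-- ===== PORT B =====
def pvDirs : PySem.Dict Char Int := PySem.Dict.ofList [('^', 0), ('>', 1), ('v', 2), ('<', 3)]

-- reverse scan of one enumerated row, first match wins (early return)
def pvRowFind (r : Int) : List (Int × Char) → Option ((Int × Int) × Int)
  | [] => none
  | cp :: rest =>
    match pvDirs.get? cp.2 with
    | some d => some ((r, cp.1), d)
    | none => pvRowFind r rest

-- reverse scan of the enumerated grid rows
def pvGridFind : List (Int × String) → Option ((Int × Int) × Int)
  | [] => none
  | rp :: rest =>
    match pvRowFind rp.1 (PySem.List.enumerate rp.2.toList).reverse with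
    | some x => some x
    | none => pvGridFind rest

def get_positions_alt (grid : List String) : (List (Int × Int)) × (Option (Int × Int)) × Option Int :=
  let obstacles :=
    (PySem.List.enumerate grid).flatMap (fun rp =>
      ((PySem.List.enumerate rp.2.toList).filter (fun cp => cp.2 = '#')).map
        (fun cp => (rp.1, cp.1)))
  match pvGridFind (PySem.List.enumerate grid).reverse with
  | some (pos, d) => (obstacles, some pos, some d)
  | none => (obstacles, none, none)

-- ===== PRECONDITION & SPEC =====
def Spec_get_positions (grid : List String) (out : (List (Int × Int)) × (Option (Int × Int)) × Option Int) : Prop := out = get_positions_alt grid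
instance (grid : List String) (out : (List (Int × Int)) × (Option (Int × Int)) × Option Int) : Decidable (Spec_get_positions grid out) := by unfold Spec_get_positions; infer_instance

-- ===== CLAIM (what is proved, stated in full; the proofs are below) =====
def Claim_equal_get_positions : Prop := ∀ (grid : List String), Dom_get_positions grid → Spec_get_positions grid (get_positions grid)

-- ===== LEMMAS AND PROOFS =====

theorem pvDirs_get (c : Char) : pvDirs.get? c = guard_direction_from_character c := by
  have h : pvDirs = PySem.Dict.mk [('^', 0), ('>', 1), ('v', 2), ('<', 3)] := by decide
  rw [h]
  simp only [PySem.Dict.get?_mk_cons, guard_direction_from_character]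
  split_ifs <;> simp_all [PySem.Dict.get?] <;> simp_all [eq_comm]

-- the guard state merge: a row/grid match overrides, otherwise keep the old state
def pvMerge (m : Option ((Int × Int) × Int)) (g : (Option (Int × Int)) × Option Int) :
    (Option (Int × Int)) × Option Int :=
  match m with
  | some (p, d) => (some p, some d)
  | none => g

theorem pvRowFind_append (r : Int) (l : List (Int × Char)) (c : Int × Char) :
    pvRowFind r (l ++ [c]) =
      match pvRowFind r l with
      | some x => some x
      | none => pvRowFind r [c] := by
  induction l with
  | nil => rfl
  | cons a l ih =>
      simp only [List.cons_append, pvRowFind, ih]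
      cases pvDirs.get? a.2 <;> simp

theorem pvFoldA_row (r : Int) (cps : List (Int × Char))
    (st : (List (Int × Int)) × (Option (Int × Int)) × Option Int) :
    cps.foldl (pvStepA r) st =
      (st.1 ++ ((cps.filter (fun cp => cp.2 = '#')).map (fun cp => (r, cp.1))),
       pvMerge (pvRowFind r cps.reverse) st.2) := by
  induction cps generalizing st with
  | nil => simp [pvRowFind, pvMerge]
  | cons c rest ih =>
      simp only [List.foldl_cons, ih, List.reverse_cons, pvRowFind_append]
      by_cases h : c.2 = '#'
      · have hd : pvDirs.get? '#' = none := by decide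
        cases hrest : pvRowFind r rest.reverse <;>
          simp [pvStepA, h, pvRowFind, hd, pvMerge]
      · cases hd : guard_direction_from_character c.2 with
        | some d =>
            cases hrest : pvRowFind r rest.reverse <;>
              simp [pvStepA, h, hd, pvRowFind, pvDirs_get, pvMerge]
        | none =>
            cases hrest : pvRowFind r rest.reverse <;>
              simp [pvStepA, h, hd, pvRowFind, pvDirs_get, pvMerge]

theorem pvGridFind_append (l : List (Int × String)) (x : Int × String) :
    pvGridFind (l ++ [x]) =
      match pvGridFind l with
      | some y => some y
      | none => pvGridFind [x] := by
  induction l with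
  | nil => rfl
  | cons a l ih =>
      simp only [List.cons_append, pvGridFind, ih]
      cases pvRowFind a.1 (PySem.List.enumerate a.2.toList).reverse <;> simp

theorem pvFoldA_grid (l : List (Int × String))
    (st : (List (Int × Int)) × (Option (Int × Int)) × Option Int) :
    l.foldl (fun st rp => (PySem.List.enumerate rp.2.toList).foldl (pvStepA rp.1) st) st =
      (st.1 ++ l.flatMap (fun rp =>
          ((PySem.List.enumerate rp.2.toList).filter (fun cp => cp.2 = '#')).map
            (fun cp => (rp.1, cp.1))),
       pvMerge (pvGridFind l.reverse) st.2) := by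
  induction l generalizing st with
  | nil => simp [pvGridFind, pvMerge]
  | cons x rest ih =>
      rw [List.foldl_cons, pvFoldA_row, ih, List.reverse_cons, pvGridFind_append]
      cases hrest : pvGridFind rest.reverse with
      | some y => simp [pvMerge]
      | none =>
          cases hx : pvRowFind x.1 (PySem.List.enumerate x.2.toList).reverse <;>
            simp [pvGridFind, pvMerge, hx]

-- ===== VERDICT (by name: the statement is the Claim_ definition above) =====
theorem get_positions_spec : Claim_equal_get_positions := by
  intro grid _
  show get_positions grid = get_positions_alt grid
  rw [get_positions, get_positions_alt, pvFoldA_grid]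
  cases h : pvGridFind (PySem.List.enumerate grid).reverse with
  | none => simp [pvMerge]
  | some x => cases x with
    | mk p d => simp [pvMerge]
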